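-- pv_equiv track=rewrite | github.com/klima7/Pol-Spider | datasets/scripts/synthesis/translation.py | split_set_query
-- ===== SOURCE A (Python) =====
-- def split_set_query(tokens):
--     active_query = []
--     queries = []
--     parenth_level = 0
--
--     for i in range(len(tokens)):
--         token = tokens[i]
--
--         if str(token) == "(":
--             parenth_level += 1
--
--         elif str(token) == ")":
--             parenth_level -= 1
--
--         if (
--             str(token).upper() in ["UNION", "EXCEPT", "INTERSECT"]
--             and parenth_level == 0
--         ):
--             queries.append(active_query)
--             active_query = []
--         else:
--             active_query.append(token)
--
--     queries.append(active_query)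
--     return queries
-- ===== SOURCE B (Python) =====
-- def split_set_query(tokens):
--     # Phase 1: collect indices of top-level set operators (depth counter only).
--     depth = 0
--     cuts = []
--     for i in range(len(tokens)):
--         s = str(tokens[i])
--         if s == "(":
--             depth += 1
--         elif s == ")":
--             depth -= 1
--         if depth == 0 and s.upper() in ["UNION", "EXCEPT", "INTERSECT"]:
--             cuts.append(i)
--     # Phase 2: slice between consecutive boundaries, operators excluded.
--     bounds = [-1] + cuts + [len(tokens)]
--     return [tokens[a + 1:b] for a, b in zip(bounds, bounds[1:])]
-- ===== Notes on version B (the rewrite author's own statement) =====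
-- stated objective: alternative
-- what changed: A accumulates tokens into an active query and flushes it at each top-level set operator in one stateful pass; B first collects the indices of top-level UNION/EXCEPT/INTERSECT with a depth counter and then produces the segments by slicing between consecutive boundary indices.
import Mathlib
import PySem

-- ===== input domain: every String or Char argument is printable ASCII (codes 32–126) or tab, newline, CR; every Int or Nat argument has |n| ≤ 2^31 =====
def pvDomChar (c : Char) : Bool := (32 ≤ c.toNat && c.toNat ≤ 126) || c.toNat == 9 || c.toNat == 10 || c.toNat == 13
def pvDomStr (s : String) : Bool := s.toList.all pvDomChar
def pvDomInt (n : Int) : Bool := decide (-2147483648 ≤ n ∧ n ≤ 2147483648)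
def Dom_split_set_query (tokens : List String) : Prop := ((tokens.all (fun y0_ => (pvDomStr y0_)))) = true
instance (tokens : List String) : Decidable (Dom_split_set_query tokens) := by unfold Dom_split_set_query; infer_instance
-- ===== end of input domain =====

-- B replaces A's accumulate-and-reset pass by a boundary-index pass followed by slicing; same cost, different decomposition.

-- shared atoms: the parenthesis-level update and the set-operator test
def updLevel (level : Int) (t : String) : Int :=
  if t = "(" then level + 1 else if t = ")" then level - 1 else level

def opTok (t : String) : Bool :=
  decide (PySem.Str.upper t ∈ (["UNION", "EXCEPT", "INTERSECT"] : List String))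

-- ===== PORT A =====
-- A's single pass: accumulate tokens into active_query, flush it on a top-level set operator.
def goA (tokens : List String) (level : Int) (active : List String)
    (queries : List (List String)) : List (List String) :=
  match tokens with
  | [] => queries ++ [active]
  | t :: ts =>
    let d := updLevel level t
    if opTok t ∧ d = 0 then goA ts d [] (queries ++ [active])
    else goA ts d (active ++ [t]) queries

def split_set_query (tokens : List String) : List (List String) :=
  goA tokens 0 [] []

-- ===== PORT B =====
-- Phase 1 of B: indices (absolute, starting at i) of top-level set operators.
def cutsB (tokens : List String) (i : Int) (depth : Int) : List Int :=
  match tokens with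
  | [] => []
  | t :: ts =>
    let d := updLevel depth t
    if d = 0 ∧ opTok t then i :: cutsB ts (i + 1) d else cutsB ts (i + 1) d

-- Phase 2 of B: slice between consecutive boundaries [-1] ++ cuts ++ [len].
def split_set_query_alt (tokens : List String) : List (List String) :=
  let cuts := cutsB tokens 0 0
  let bounds : List Int := -1 :: (cuts ++ [(tokens.length : Int)])
  (bounds.zip bounds.tail).map (fun p => PySem.List.slice tokens (some (p.1 + 1)) (some p.2))

-- ===== PRECONDITION & SPEC =====
def Spec_split_set_query (tokens : List String) (out : List (List String)) : Prop := out = split_set_query_alt tokens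
instance (tokens : List String) (out : List (List String)) : Decidable (Spec_split_set_query tokens out) := by unfold Spec_split_set_query; infer_instance

-- ===== CLAIM (what is proved, stated in full; the proofs are below) =====
def Claim_equal_split_set_query : Prop := ∀ (tokens : List String), Dom_split_set_query tokens → Spec_split_set_query tokens (split_set_query tokens)

-- ===== LEMMAS AND PROOFS =====

-- B's result as a function of the starting depth (proof-side name for the body of split_set_query_alt)
def segsOf (tokens : List String) (d : Int) : List (List String) :=
  let cuts := cutsB tokens 0 d
  let bounds : List Int := -1 :: (cuts ++ [(tokens.length : Int)])
  (bounds.zip bounds.tail).map (fun p => PySem.List.slice tokens (some (p.1 + 1)) (some p.2))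

theorem cutsB_shift (ts : List String) (i : Int) : ∀ (j d : Int),
    cutsB ts (i + j) d = (cutsB ts j d).map (fun x => i + x) := by
  induction ts with
  | nil => intro j d; simp [cutsB]
  | cons t ts ih =>
    intro j d
    simp only [cutsB]
    have h1 : i + j + 1 = i + (j + 1) := by ring
    split_ifs with h
    · simp [h1, ih (j + 1)]
    · simp [h1, ih (j + 1)]

theorem cutsB_nonneg (ts : List String) : ∀ (i d x : Int), x ∈ cutsB ts i d → i ≤ x := by
  induction ts with
  | nil => intro i d x hx; simp [cutsB] at hx
  | cons t ts ih =>
    intro i d x hx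
    simp only [cutsB] at hx
    split_ifs at hx with h
    · rcases List.mem_cons.mp hx with rfl | hx
      · exact le_refl x
      · have := ih (i + 1) _ x hx; omega
    · have := ih (i + 1) _ x hx; omega

theorem slice_cons_succ (t : String) (ts : List String) (a b : Int) (ha : 0 ≤ a) (hb : 0 ≤ b) :
    PySem.List.slice (t :: ts) (some (a + 1)) (some (b + 1)) = PySem.List.slice ts (some a) (some b) := by
  rw [PySem.List.slice_toNat _ (by omega) (by omega), PySem.List.slice_toNat _ ha hb]
  have h1 : (a + 1).toNat = a.toNat + 1 := by omega
  have h2 : (b + 1).toNat = b.toNat + 1 := by omega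
  simp [h1, h2]

theorem slice_cons_zero (t : String) (ts : List String) (b : Int) (hb : 0 ≤ b) :
    PySem.List.slice (t :: ts) (some 0) (some (b + 1)) = t :: PySem.List.slice ts (some 0) (some b) := by
  rw [PySem.List.slice_toNat _ (by omega) (by omega), PySem.List.slice_toNat _ (by omega) hb]
  have h2 : (b + 1).toNat = b.toNat + 1 := by omega
  simp [h2, List.take_succ_cons]

-- shifting every boundary pair by one drops the head token from every slice
theorem map_slice_shift (t : String) (ts : List String) (P : List (Int × Int))
    (hP : ∀ p ∈ P, -1 ≤ p.1 ∧ 0 ≤ p.2) :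
    (P.map (Prod.map (fun x => 1 + x) (fun x => 1 + x))).map
        (fun p => PySem.List.slice (t :: ts) (some (p.1 + 1)) (some p.2))
      = P.map (fun p => PySem.List.slice ts (some (p.1 + 1)) (some p.2)) := by
  rw [List.map_map]
  apply List.map_congr_left
  intro p hp
  rcases hP p hp with ⟨h1, h2⟩
  show PySem.List.slice (t :: ts) (some (1 + p.1 + 1)) (some (1 + p.2)) = _
  have e1 : 1 + p.1 + 1 = (p.1 + 1) + 1 := by ring
  have e2 : 1 + p.2 = p.2 + 1 := by ring
  rw [e1, e2, slice_cons_succ t ts (p.1 + 1) p.2 (by omega) h2]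

theorem segsOf_ne_nil (ts : List String) (d : Int) : segsOf ts d ≠ [] := by
  simp only [segsOf]
  rcases h : cutsB ts 0 d ++ [((ts.length : Int))] with _ | ⟨r0, rr⟩
  · simp at h
  · simp

-- one step of B, matching A's two branches
theorem segsOf_cons (t : String) (ts : List String) (d : Int) :
    segsOf (t :: ts) d =
      if updLevel d t = 0 ∧ opTok t then [] :: segsOf ts (updLevel d t)
      else match segsOf ts (updLevel d t) with
        | [] => []
        | s :: rest => (t :: s) :: rest := by
  set d' := updLevel d t with hd'
  have hunf : ∀ (us : List String) (e : Int), segsOf us e =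
      ((((-1 : Int) :: (cutsB us 0 e ++ [((us.length : Int))])).zip
          (cutsB us 0 e ++ [((us.length : Int))])).map
        (fun p => PySem.List.slice us (some (p.1 + 1)) (some p.2))) := by
    intro us e; simp only [segsOf, List.tail_cons]
  rw [hunf (t :: ts) d, hunf ts d']
  simp only [cutsB, ← hd']
  have hshift : cutsB ts (0 + 1) d' = (cutsB ts 0 d').map (fun x => 1 + x) := by
    simpa using cutsB_shift ts 1 0 d'
  have hlen : (((t :: ts).length : Int)) = 1 + ((ts.length : Int)) := by
    push_cast [List.length_cons]; ring
  rw [hshift, hlen]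
  set C : List Int := cutsB ts 0 d' with hC
  set n : Int := ((ts.length : Int)) with hn
  have hn0 : 0 ≤ n := by positivity
  have hCnn : ∀ x ∈ C, 0 ≤ x := fun x hx => cutsB_nonneg ts 0 d' x hx
  set R : List Int := C ++ [n] with hR
  have hRnn : ∀ x ∈ R, 0 ≤ x := by
    intro x hx
    rcases List.mem_append.mp hx with hx | hx
    · exact hCnn x hx
    · simp at hx; omega
  have hPnn : ∀ p ∈ (((-1 : Int) :: R).zip R), -1 ≤ p.1 ∧ 0 ≤ p.2 := by
    intro p hp
    rcases List.of_mem_zip hp with ⟨h1, h2⟩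
    refine ⟨?_, hRnn _ h2⟩
    rcases List.mem_cons.mp h1 with e | h1
    · omega
    · have := hRnn _ h1; omega
  have hb : C.map (fun x => (1 : Int) + x) ++ [1 + n] = R.map (fun x => 1 + x) := by
    simp [hR]
  have hmapR : ((0 : Int) :: R.map (fun x => 1 + x))
      = ((-1 : Int) :: R).map (fun x => 1 + x) := by simp
  rcases hRcons : R with _ | ⟨r0, rr⟩
  · exact absurd (hR ▸ hRcons) (by simp)
  have hr0 : 0 ≤ r0 := hRnn r0 (by simp [hRcons])
  split_ifs with h
  · -- operator at top level: first slice is empty, the rest are ts's slices shifted by one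
    rw [List.cons_append, hb, List.zip_cons_cons, hmapR, List.zip_map, List.map_cons,
      map_slice_shift t ts _ hPnn, hRcons, List.zip_cons_cons]
    refine (List.cons_eq_cons).mpr ⟨?_, rfl⟩
    show PySem.List.slice (t :: ts) (some (-1 + 1)) (some (0 : Int)) = []
    rw [show (-1 : Int) + 1 = 0 from by ring, PySem.List.slice_toNat _ le_rfl le_rfl]
    simp
  · -- ordinary token: the head token is prepended to the first slice
    rw [hb, hRcons]
    rw [show ((r0 :: rr).map (fun x => (1 : Int) + x)) = (1 + r0) :: rr.map (fun x => 1 + x) from by simp]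
    rw [List.zip_cons_cons]
    rw [show ((1 + r0) :: rr.map (fun x => (1 : Int) + x)) = (r0 :: rr).map (fun x => 1 + x) from by simp]
    have hPnn2 : ∀ p ∈ ((r0 :: rr).zip rr), -1 ≤ p.1 ∧ 0 ≤ p.2 := by
      intro p hp
      exact hPnn p (by rw [hRcons, List.zip_cons_cons]; exact List.mem_cons_of_mem _ hp)
    rw [List.zip_map, List.map_cons, map_slice_shift t ts _ hPnn2]
    rw [List.zip_cons_cons, List.map_cons]
    show (PySem.List.slice (t :: ts) (some (-1 + 1)) (some (1 + r0))
        :: (((r0 :: rr).zip rr).map (fun p => PySem.List.slice ts (some (p.1 + 1)) (some p.2)))) = _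
    refine (List.cons_eq_cons).mpr ⟨?_, rfl⟩
    rw [show (-1 : Int) + 1 = 0 from by ring, show (1 : Int) + r0 = r0 + 1 from by ring,
      slice_cons_zero t ts r0 hr0]

theorem goA_eq (ts : List String) : ∀ (d : Int) (active : List String) (queries : List (List String)),
    goA ts d active queries =
      queries ++ (match segsOf ts d with
        | [] => []
        | s :: rest => (active ++ s) :: rest) := by
  induction ts with
  | nil =>
    intro d active queries
    have h0 : segsOf [] d = [[]] := by
      simp only [segsOf, cutsB]
      simp [PySem.List.slice]
    rw [h0]
    simp [goA]
  | cons t ts ih =>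
    intro d active queries
    rw [segsOf_cons]
    show (if opTok t ∧ updLevel d t = 0 then goA ts (updLevel d t) [] (queries ++ [active])
          else goA ts (updLevel d t) (active ++ [t]) queries) = _
    by_cases h : opTok t = true ∧ updLevel d t = 0
    · rw [if_pos ⟨h.1, h.2⟩, if_pos ⟨h.2, h.1⟩, ih]
      rcases hs : segsOf ts (updLevel d t) with _ | ⟨s, rest⟩
      · exact absurd hs (segsOf_ne_nil ts (updLevel d t))
      · simp
    · rw [if_neg (fun hh => h ⟨hh.1, hh.2⟩), if_neg (fun hh => h ⟨hh.2, hh.1⟩), ih]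
      rcases hs : segsOf ts (updLevel d t) with _ | ⟨s, rest⟩
      · exact absurd hs (segsOf_ne_nil ts (updLevel d t))
      · simp

theorem alt_eq_segsOf (ts : List String) : split_set_query_alt ts = segsOf ts 0 := rfl

-- ===== VERDICT (by name: the statement is the Claim_ definition above) =====
theorem split_set_query_spec : Claim_equal_split_set_query := by
  intro tokens _
  unfold Spec_split_set_query
  rw [alt_eq_segsOf, split_set_query, goA_eq]
  rcases h : segsOf tokens 0 with _ | ⟨s, rest⟩
  · exact absurd h (segsOf_ne_nil tokens 0)
  · simp
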